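-- pv_equiv track=rewrite | github.com/DazhuoQ/SkylineExp | src/partalg.py | greedy_merge_small_buckets
-- ===== SOURCE A (Python) =====
-- from collections import deque
--
-- def greedy_merge_small_buckets(small_buckets, m, target_size):
--     """
--     Merge small buckets into m clusters using a greedy size-aware strategy.
--     """
--     clusters = [[] for _ in range(m)]
--     bucket_queue = deque(sorted(small_buckets, key=lambda b: -len(b)))
--
--     while bucket_queue:
--         bucket = bucket_queue.popleft()
--         # find cluster with most space
--         sizes = [len(c) for c in clusters]
--         idx = sizes.index(min(sizes))
--         clusters[idx].extend(bucket)
--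
--     return clusters
-- ===== SOURCE B (Python) =====
-- def greedy_merge_small_buckets(small_buckets, m, target_size):
--     # Clusters kept as a list of (size, idx, items) entries sorted ascending by
--     # (size, idx): the head IS the least-loaded cluster with the smallest
--     # index, so A's per-bucket rebuild of the sizes list + min + index scans
--     # becomes: pop the head, extend it, and re-insert it at its sorted slot,
--     # found by scanning from the back (the grown entry tends to land there).
--     entries = [(0, i, []) for i in range(m)]
--     for bucket in sorted(small_buckets, key=lambda b: -len(b)):
--         size, idx, items = entries.pop(0)
--         items.extend(bucket)
--         size += len(bucket)
--         pos = len(entries)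
--         while pos > 0 and (entries[pos - 1][0], entries[pos - 1][1]) > (size, idx):
--             pos -= 1
--         entries.insert(pos, (size, idx, items))
--     result = [None] * m
--     for _, i, items in entries:
--         result[i] = items
--     return result
-- ===== Notes on version B (the rewrite author's own statement) =====
-- stated objective: faster
-- what changed: B keeps the clusters as a list of (size, index, items) entries sorted ascending by (size, index): each bucket pops the head (the least-loaded cluster) and re-inserts the grown entry at its sorted slot found by a short backward scan, and the result is rebuilt by writing each entry back at its own index, removing A's per-bucket rebuild of the sizes list plus min plus index scans.
import Mathlib
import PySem

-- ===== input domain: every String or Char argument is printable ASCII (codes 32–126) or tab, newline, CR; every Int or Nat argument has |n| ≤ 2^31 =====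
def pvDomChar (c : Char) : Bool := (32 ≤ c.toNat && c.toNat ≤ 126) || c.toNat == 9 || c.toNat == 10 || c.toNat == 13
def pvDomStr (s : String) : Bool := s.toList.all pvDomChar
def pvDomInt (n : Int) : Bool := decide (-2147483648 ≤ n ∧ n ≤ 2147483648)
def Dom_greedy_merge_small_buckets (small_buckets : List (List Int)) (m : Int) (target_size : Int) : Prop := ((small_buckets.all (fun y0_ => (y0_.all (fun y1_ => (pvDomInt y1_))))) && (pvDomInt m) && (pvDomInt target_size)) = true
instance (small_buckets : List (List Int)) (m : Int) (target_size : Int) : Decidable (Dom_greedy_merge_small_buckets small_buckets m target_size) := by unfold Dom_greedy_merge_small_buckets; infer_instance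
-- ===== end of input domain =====

-- B replaces A's per-bucket sizes/min/index scans by a cluster list kept sorted by (size, index):
-- pop the head (the least-loaded cluster), re-insert it at its sorted slot (backward scan), and
-- finally write each cluster back at its own index; measurably faster on the timing inputs.


-- ===== PORT A =====
-- loop body of A's while-loop (one bucket assigned to the least-loaded cluster)
def pvStepA (clusters : List (List Int)) (bucket : List Int) : List (List Int) :=
  let sizes := clusters.map (fun c => (c.length : Int))
  match PySem.List.min? sizes (fun x => x) with
  | none => clusters      -- min([]) raises ValueError in Python; excluded by Pre_
  | some mn =>
    match PySem.List.index? sizes mn with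
    | none => clusters    -- unreachable: mn is a member of sizes
    | some idx => clusters.set idx (clusters.getD idx [] ++ bucket)

def greedy_merge_small_buckets (small_buckets : List (List Int)) (m : Int) (target_size : Int) : List (List Int) :=
  let clusters := (PySem.List.pyRange 0 m).map (fun _ => ([] : List Int))
  let bucket_queue := PySem.List.sorted small_buckets (fun b => -(b.length : Int))
  bucket_queue.foldl pvStepA clusters

-- ===== PORT B =====
-- tuple comparison (entries[pos - 1][0], entries[pos - 1][1]) > (size, idx)
def pvKeyGt (x e : Int × Int × List Int) : Bool :=
  decide (e.1 < x.1) || (x.1 == e.1 && decide (e.2.1 < x.2.1))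

-- Source B's backward while-loop + insert, as a scan over the REVERSED tail:
-- walk entries from the back past every key > e's, then place e
def pvInsBackAux (e : Int × Int × List Int) : List (Int × Int × List Int) → List (Int × Int × List Int)
  | [] => [e]
  | x :: xs => if pvKeyGt x e then x :: pvInsBackAux e xs else e :: x :: xs

def pvInsBack (e : Int × Int × List Int) (l : List (Int × Int × List Int)) : List (Int × Int × List Int) :=
  (pvInsBackAux e l.reverse).reverse

-- loop body of B's for-loop (pop the head, grow it, re-insert at its sorted slot)
def pvStepB (entries : List (Int × Int × List Int)) (bucket : List Int) : List (Int × Int × List Int) :=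
  match entries with
  | [] => []              -- entries.pop(0) raises IndexError in Python; excluded by Pre_
  | (size, idx, items) :: rest =>
      pvInsBack (size + (bucket.length : Int), idx, items ++ bucket) rest

def greedy_merge_small_buckets_alt (small_buckets : List (List Int)) (m : Int) (target_size : Int) : List (List Int) :=
  let entries0 : List (Int × Int × List Int) :=
    (PySem.List.pyRange 0 m).map (fun i => ((0 : Int), i, ([] : List Int)))
  let entries := (PySem.List.sorted small_buckets (fun b => -(b.length : Int))).foldl pvStepB entries0
  -- result = [None] * m; result[i] = items: every index 0..m-1 occurs exactly once among the
  -- entries, so each slot is overwritten; [] stands in for the never-observed None placeholder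
  entries.foldl (fun result e => result.set e.2.1.toNat e.2.2) (List.replicate m.toNat [])

-- ===== PRECONDITION & SPEC =====
-- Pre_ excludes exactly the inputs where Python A raises: a nonempty bucket list with m < 1
-- (min() of the empty sizes list raises ValueError).
def Pre_greedy_merge_small_buckets (small_buckets : List (List Int)) (m : Int) (target_size : Int) : Prop :=
  small_buckets = [] ∨ 1 ≤ m
instance (small_buckets : List (List Int)) (m : Int) (target_size : Int) : Decidable (Pre_greedy_merge_small_buckets small_buckets m target_size) := by unfold Pre_greedy_merge_small_buckets; infer_instance

def pvWitness_greedy_merge_small_buckets : List (List Int) × Int × Int := ([[1], [2, 3]], 2, 5)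

def Spec_greedy_merge_small_buckets (small_buckets : List (List Int)) (m : Int) (target_size : Int) (out : List (List Int)) : Prop := out = greedy_merge_small_buckets_alt small_buckets m target_size
instance (small_buckets : List (List Int)) (m : Int) (target_size : Int) (out : List (List Int)) : Decidable (Spec_greedy_merge_small_buckets small_buckets m target_size out) := by unfold Spec_greedy_merge_small_buckets; infer_instance

-- ===== CLAIM (what is proved, stated in full; the proofs are below) =====
def Claim_equal_greedy_merge_small_buckets : Prop := ∀ (small_buckets : List (List Int)) (m : Int) (target_size : Int), Dom_greedy_merge_small_buckets small_buckets m target_size → Pre_greedy_merge_small_buckets small_buckets m target_size → Spec_greedy_merge_small_buckets small_buckets m target_size (greedy_merge_small_buckets small_buckets m target_size)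

-- ===== LEMMAS AND PROOFS =====

theorem pvWitness_ok :
    Dom_greedy_merge_small_buckets pvWitness_greedy_merge_small_buckets.1 pvWitness_greedy_merge_small_buckets.2.1 pvWitness_greedy_merge_small_buckets.2.2 ∧
    Pre_greedy_merge_small_buckets pvWitness_greedy_merge_small_buckets.1 pvWitness_greedy_merge_small_buckets.2.1 pvWitness_greedy_merge_small_buckets.2.2 := by
  decide

-- the (size, idx) key order on entries, as a Prop
def pvKeyLt (a b : Int × Int × List Int) : Prop :=
  a.1 < b.1 ∨ (a.1 = b.1 ∧ a.2.1 < b.2.1)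

-- the forward sorted-insert, used as a stepping stone to reason about pvInsBack
def pvKeyLe (x e : Int × Int × List Int) : Bool :=
  decide (x.1 < e.1) || (x.1 == e.1 && decide (x.2.1 ≤ e.2.1))

def pvInsEntry (e : Int × Int × List Int) : List (Int × Int × List Int) → List (Int × Int × List Int)
  | [] => [e]
  | x :: xs => if pvKeyLe x e then x :: pvInsEntry e xs else e :: x :: xs

theorem pvKeyGt_true_iff (x e : Int × Int × List Int) : pvKeyGt x e = true ↔ ¬ pvKeyLe x e = true := by
  simp only [pvKeyGt, pvKeyLe, Bool.or_eq_true, Bool.and_eq_true, decide_eq_true_eq, beq_iff_eq]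
  omega

theorem pvInsEntry_append_singleton {x e : Int × Int × List Int} (l : List (Int × Int × List Int))
    (h : pvKeyLe x e = false) : pvInsEntry e (l ++ [x]) = pvInsEntry e l ++ [x] := by
  induction l with
  | nil => simp [pvInsEntry, h]
  | cons y ys ih =>
    by_cases hy : pvKeyLe y e = true
    · simp [pvInsEntry, hy, ih]
    · simp [pvInsEntry, hy]

theorem pvInsEntry_all_le {e : Int × Int × List Int} {l : List (Int × Int × List Int)}
    (h : ∀ y ∈ l, pvKeyLe y e = true) : pvInsEntry e l = l ++ [e] := by
  induction l with
  | nil => rfl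
  | cons y ys ih =>
    rw [pvInsEntry, if_pos (h y List.mem_cons_self), ih (fun z hz => h z (List.mem_cons_of_mem y hz))]
    rfl

theorem pvKeyLe_of_lt_of_not_gt {y x e : Int × Int × List Int} (h1 : pvKeyLt y x)
    (h2 : ¬ pvKeyGt x e = true) : pvKeyLe y e = true := by
  have hx : pvKeyLe x e = true := by
    by_contra hc
    exact h2 ((pvKeyGt_true_iff x e).mpr hc)
  simp only [pvKeyLe, Bool.or_eq_true, Bool.and_eq_true, decide_eq_true_eq, beq_iff_eq] at hx ⊢
  unfold pvKeyLt at h1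
  omega

theorem pvInsBackAux_rev (e : Int × Int × List Int) (r : List (Int × Int × List Int))
    (hr : r.Pairwise (fun a b => pvKeyLt b a)) :
    (pvInsBackAux e r).reverse = pvInsEntry e r.reverse := by
  induction r with
  | nil => rfl
  | cons x xs ih =>
    rw [List.pairwise_cons] at hr
    by_cases h : pvKeyGt x e = true
    · have hle : pvKeyLe x e = false := by
        have := (pvKeyGt_true_iff x e).mp h
        simpa using this
      rw [pvInsBackAux, if_pos h, List.reverse_cons, List.reverse_cons,
        pvInsEntry_append_singleton xs.reverse hle, ih hr.2]
    · have hall : ∀ y ∈ xs.reverse ++ [x], pvKeyLe y e = true := by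
        intro y hy
        rcases List.mem_append.mp hy with hy' | hy'
        · exact pvKeyLe_of_lt_of_not_gt (hr.1 y (List.mem_reverse.mp hy')) h
        · have hyx : y = x := by simpa using hy'
          subst hyx
          by_contra hc
          exact h ((pvKeyGt_true_iff y e).mpr hc)
      rw [pvInsBackAux, if_neg h]
      simp only [List.reverse_cons]
      rw [pvInsEntry_all_le hall]

theorem pvInsBack_eq_pvInsEntry (e : Int × Int × List Int) {l : List (Int × Int × List Int)}
    (hs : l.Pairwise pvKeyLt) : pvInsBack e l = pvInsEntry e l := by
  rw [pvInsBack, pvInsBackAux_rev e l.reverse (List.pairwise_reverse.mpr hs), List.reverse_reverse]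

-- the clusters list tagged with sizes and indices, starting at index j
def pvEnum : Int → List (List Int) → List (Int × Int × List Int)
  | _, [] => []
  | j, c :: cs => ((c.length : Int), j, c) :: pvEnum (j + 1) cs

theorem pvEnum_length (j : Int) (cs : List (List Int)) : (pvEnum j cs).length = cs.length := by
  induction cs generalizing j with
  | nil => rfl
  | cons c cs ih => simp [pvEnum, ih]

theorem pvEnum_getElem (cs : List (List Int)) (j : Int) (k : Nat) (hk : k < cs.length) :
    (pvEnum j cs)[k]'(by rw [pvEnum_length]; exact hk) = (((cs[k]).length : Int), j + k, cs[k]) := by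
  induction cs generalizing j k with
  | nil => simp at hk
  | cons c cs ih =>
    cases k with
    | zero => simp [pvEnum]
    | succ k =>
      have hk' : k < cs.length := by simpa using Nat.lt_of_succ_lt_succ (by simpa using hk)
      simp only [pvEnum, List.getElem_cons_succ]
      rw [ih (j + 1) k hk']
      refine Prod.ext rfl (Prod.ext ?_ rfl)
      push_cast; ring

theorem pvEnum_mem {e : Int × Int × List Int} {j : Int} {cs : List (List Int)} :
    e ∈ pvEnum j cs ↔ ∃ k, ∃ hk : k < cs.length, e = (((cs[k]).length : Int), j + k, cs[k]) := by
  rw [List.mem_iff_getElem]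
  constructor
  · rintro ⟨k, hk, he⟩
    have hk' : k < cs.length := by rwa [pvEnum_length] at hk
    exact ⟨k, hk', by rw [← he, pvEnum_getElem cs j k hk']⟩
  · rintro ⟨k, hk, he⟩
    exact ⟨k, by rwa [pvEnum_length], by rw [pvEnum_getElem cs j k hk, he]⟩

theorem pvEnum_pairwise_idx (j : Int) (cs : List (List Int)) :
    (pvEnum j cs).Pairwise (fun a b => a.2.1 < b.2.1) := by
  rw [List.pairwise_iff_getElem]
  intro a b ha hb hab
  have ha' : a < cs.length := by rwa [pvEnum_length] at ha
  have hb' : b < cs.length := by rwa [pvEnum_length] at hb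
  rw [pvEnum_getElem cs j a ha', pvEnum_getElem cs j b hb']
  simp only
  omega

theorem pvEnum_nodup (j : Int) (cs : List (List Int)) : (pvEnum j cs).Nodup := by
  have h := pvEnum_pairwise_idx j cs
  exact h.imp (fun hlt heq => by subst heq; exact lt_irrefl _ hlt)

theorem pvEnum_set (cs : List (List Int)) (j : Int) (k : Nat) (x : List Int) (hk : k < cs.length) :
    pvEnum j (cs.set k x) = (pvEnum j cs).set k ((x.length : Int), j + k, x) := by
  induction cs generalizing j k with
  | nil => simp at hk
  | cons c cs ih =>
    cases k with
    | zero => simp [pvEnum]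
    | succ k =>
      have hk' : k < cs.length := by simpa using Nat.lt_of_succ_lt_succ (by simpa using hk)
      simp only [List.set_cons_succ, pvEnum]
      rw [ih (j + 1) k hk']
      congr 2
      refine Prod.ext rfl (Prod.ext ?_ rfl)
      push_cast; ring

theorem pv_set_perm {α : Type} (l : List α) (k : Nat) (a : α) (hk : k < l.length) :
    (l.set k a).Perm (a :: l.eraseIdx k) := by
  induction l generalizing k with
  | nil => simp at hk
  | cons x xs ih =>
    cases k with
    | zero => simp
    | succ k =>
      simp only [List.set_cons_succ, List.eraseIdx_cons_succ]
      exact ((ih k (by simpa using hk)).cons x).trans (List.Perm.swap a x _)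

theorem pvInsEntry_mem {y e : Int × Int × List Int} {l : List (Int × Int × List Int)} :
    y ∈ pvInsEntry e l ↔ y = e ∨ y ∈ l := by
  induction l with
  | nil => simp [pvInsEntry]
  | cons x xs ih =>
    by_cases h : pvKeyLe x e = true
    · simp only [pvInsEntry, if_pos h, List.mem_cons, ih]
      tauto
    · simp only [pvInsEntry, if_neg h, List.mem_cons]

theorem pvInsEntry_perm (e : Int × Int × List Int) (l : List (Int × Int × List Int)) :
    (pvInsEntry e l).Perm (e :: l) := by
  induction l with
  | nil => simp [pvInsEntry]
  | cons x xs ih =>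
    by_cases h : pvKeyLe x e = true
    · simp only [pvInsEntry, h, if_pos]
      exact (ih.cons x).trans (List.Perm.swap e x xs)
    · simp [pvInsEntry, h]

theorem pvKeyLt_of_le {x e : Int × Int × List Int} (h : pvKeyLe x e = true)
    (hne : x.2.1 ≠ e.2.1) : pvKeyLt x e := by
  simp only [pvKeyLe, Bool.or_eq_true, Bool.and_eq_true, decide_eq_true_eq, beq_iff_eq] at h
  unfold pvKeyLt; omega

theorem pvKeyLt_of_not_le {x e : Int × Int × List Int} (h : ¬ pvKeyLe x e = true) : pvKeyLt e x := by
  simp only [pvKeyLe, Bool.or_eq_true, Bool.and_eq_true, decide_eq_true_eq, beq_iff_eq,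
    not_or, not_and] at h
  unfold pvKeyLt; omega

theorem pvKeyLt_trans {a b c : Int × Int × List Int} (h1 : pvKeyLt a b) (h2 : pvKeyLt b c) :
    pvKeyLt a c := by
  unfold pvKeyLt at *; omega

theorem pvInsEntry_pairwise {e : Int × Int × List Int} {l : List (Int × Int × List Int)}
    (hs : l.Pairwise pvKeyLt) (hne : ∀ x ∈ l, x.2.1 ≠ e.2.1) :
    (pvInsEntry e l).Pairwise pvKeyLt := by
  induction l with
  | nil => simp [pvInsEntry]
  | cons x xs ih =>
    rw [List.pairwise_cons] at hs
    by_cases h : pvKeyLe x e = true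
    · simp only [pvInsEntry, if_pos h]
      rw [List.pairwise_cons]
      refine ⟨?_, ih hs.2 (fun y hy => hne y (List.mem_cons_of_mem x hy))⟩
      intro y hy
      rcases pvInsEntry_mem.mp hy with rfl | hy'
      · exact pvKeyLt_of_le h (hne x (List.mem_cons_self))
      · exact hs.1 y hy'
    · simp only [pvInsEntry, if_neg h]
      rw [List.pairwise_cons]
      refine ⟨?_, List.pairwise_cons.mpr hs⟩
      intro y hy
      rcases List.mem_cons.mp hy with rfl | hy'
      · exact pvKeyLt_of_not_le h
      · exact pvKeyLt_trans (pvKeyLt_of_not_le h) (hs.1 y hy')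

theorem pv_index?_first {xs : List Int} {v : Int} {k : Nat} (hk : k < xs.length)
    (hv : xs[k] = v) (hfirst : ∀ j (hj : j < k), xs[j]'(by omega) ≠ v) :
    PySem.List.index? xs v = some k := by
  induction xs generalizing k with
  | nil => simp at hk
  | cons x xs ih =>
    cases k with
    | zero =>
      have hx : x = v := hv
      rw [← hx]
      exact PySem.List.index?_cons_self x xs
    | succ k =>
      have hx : x ≠ v := hfirst 0 (Nat.succ_pos k)
      rw [PySem.List.index?_cons_of_ne xs hx,
        ih (by simpa using hk) hv (fun j hj => hfirst (j + 1) (by omega))]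
      rfl

theorem pvEnum_replicate (n : Nat) (j : Int) :
    pvEnum j (List.replicate n []) = (List.range n).map (fun (k : Nat) => ((0 : Int), j + (k : Int), ([] : List Int))) := by
  induction n generalizing j with
  | zero => rfl
  | succ n ih =>
    rw [List.replicate_succ, List.range_succ_eq_map]
    simp only [pvEnum, ih (j + 1), List.map_cons, List.map_map]
    refine congrArg₂ _ (by simp) ?_
    refine List.map_congr_left (fun k _ => ?_)
    simp only [Function.comp_apply]
    refine Prod.ext rfl (Prod.ext ?_ rfl)
    push_cast; ring

theorem pvStepA_length (cs : List (List Int)) (b : List Int) : (pvStepA cs b).length = cs.length := by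
  unfold pvStepA
  cases h1 : PySem.List.min? (cs.map (fun c => ((c : List Int).length : Int))) (fun x => x) with
  | none => simp [h1]
  | some mn =>
    simp only [h1, PySem.List.index?_eq_idxOf?]
    cases List.idxOf? mn (cs.map (fun c => ((c : List Int).length : Int))) with
    | none => simp
    | some idx => simp

theorem pv_foldA_length (queue : List (List Int)) : ∀ cs : List (List Int),
    (queue.foldl pvStepA cs).length = cs.length := by
  induction queue with
  | nil => intro cs; rfl
  | cons b queue ih =>
    intro cs
    rw [List.foldl_cons, ih (pvStepA cs b), pvStepA_length]

-- writing each entry's items at its own index rebuilds the clusters list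
theorem pv_scatter (cs : List (List Int)) : ∀ (es : List (Int × Int × List Int)) (r : List (List Int))
    (hlen : r.length = cs.length),
    (∀ e ∈ es, ∃ k, ∃ hk : k < cs.length, e.2.1 = (k : Int) ∧ e.2.2 = cs[k]) →
    (∀ k (hk : k < cs.length), ((k : Int)) ∉ es.map (fun e => e.2.1) →
      r[k]'(by rw [hlen]; exact hk) = cs[k]) →
    es.foldl (fun result e => result.set e.2.1.toNat e.2.2) r = cs := by
  intro es
  induction es with
  | nil =>
    intro r hlen _ hagree
    apply List.ext_getElem (by simpa using hlen)
    intro k hk1 hk2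
    exact hagree k hk2 (by simp)
  | cons e es ih =>
    intro r hlen hel hagree
    obtain ⟨ke, hke, hke1, hke2⟩ := hel e List.mem_cons_self
    have htn : e.2.1.toNat = ke := by rw [hke1]; simp
    rw [List.foldl_cons]
    refine ih _ (by simpa using hlen) (fun x hx => hel x (List.mem_cons_of_mem e hx)) ?_
    intro k hk habs
    by_cases hkk : k = ke
    · subst hkk
      rw [htn, hke2]
      rw [List.getElem_set_self]
    · rw [htn, List.getElem_set_ne (fun h => hkk h.symm)]
      exact hagree k hk (by
        simp only [List.map_cons, List.mem_cons, not_or]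
        refine ⟨fun h => hkk ?_, habs⟩
        rw [hke1] at h
        exact_mod_cast h)

-- one step preserves the invariant
theorem pv_step_inv (cs : List (List Int)) (es : List (Int × Int × List Int)) (b : List Int)
    (hp : es.Perm (pvEnum 0 cs)) (hs : es.Pairwise pvKeyLt) :
    (pvStepB es b).Perm (pvEnum 0 (pvStepA cs b)) ∧ (pvStepB es b).Pairwise pvKeyLt := by
  cases cs with
  | nil =>
    have hes : es = [] := List.Perm.eq_nil (by simpa [pvEnum] using hp)
    subst hes
    exact ⟨by simp [pvStepA, pvStepB, pvEnum, PySem.List.min?], by simp [pvStepB]⟩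
  | cons c0 cs0 =>
    set cs := c0 :: cs0 with hcs
    have hlen : 0 < cs.length := by simp [hcs]
    cases es with
    | nil =>
      exfalso
      have := hp.length_eq
      rw [pvEnum_length] at this
      simp at this
      omega
    | cons e rest =>
      obtain ⟨s, i, c⟩ := e
      -- where the head sits in the clusters list
      have he_mem : ((s, i, c) : Int × Int × List Int) ∈ pvEnum 0 cs :=
        hp.subset List.mem_cons_self
      obtain ⟨k, hk, hek⟩ := pvEnum_mem.mp he_mem
      have hs_eq : s = ((cs[k]).length : Int) := by
        simpa using congrArg Prod.fst hek
      have hi_eq : i = (k : Int) := by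
        have := congrArg (fun p => p.2.1) hek
        simpa using this
      have hc_eq : c = cs[k] := by
        simpa using congrArg (fun p => p.2.2) hek
      -- the head is key-minimal among all entries
      have hmin : ∀ y ∈ pvEnum 0 cs, y = ((s, i, c) : Int × Int × List Int) ∨ pvKeyLt (s, i, c) y := by
        intro y hy
        rcases List.mem_cons.mp (hp.mem_iff.mpr hy) with h | h
        · exact Or.inl h
        · exact Or.inr ((List.pairwise_cons.mp hs).1 y h)
      have hsize_min : ∀ k' (hk' : k' < cs.length),
          s ≤ ((cs[k']).length : Int) ∧ (((cs[k']).length : Int) = s → k ≤ k') := by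
        intro k' hk'
        rcases hmin (((cs[k']).length : Int), (0 : Int) + k', cs[k'])
            (pvEnum_mem.mpr ⟨k', hk', rfl⟩) with h | h
        · have h1 : ((cs[k']).length : Int) = s := by simpa using congrArg Prod.fst h
          have h2 : ((0 : Int) + k' : Int) = i := by
            have := congrArg (fun p => p.2.1) h
            simpa using this
          constructor
          · omega
          · intro _; rw [hi_eq] at h2; omega
        · unfold pvKeyLt at h
          simp only at h
          rw [hi_eq] at h
          constructor
          · omega
          · intro hl; omega
      -- A's min() call returns the head's size
      have hs_mem : s ∈ cs.map (fun c => ((c : List Int).length : Int)) := by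
        rw [hs_eq]
        exact List.mem_map_of_mem (List.getElem_mem hk)
      have hmn : PySem.List.min? (cs.map (fun c => ((c : List Int).length : Int))) (fun x => x) = some s := by
        cases h : PySem.List.min? (cs.map (fun c => ((c : List Int).length : Int))) (fun x => x) with
        | none =>
          rw [PySem.List.min?_eq_none_iff] at h
          simp [h] at hs_mem
        | some v =>
          have hv_mem := PySem.List.min?_mem h
          obtain ⟨cv, hcv, hveq⟩ := List.mem_map.mp hv_mem
          obtain ⟨kv, hkv, hcveq⟩ := List.mem_iff_getElem.mp hcv
          have h1 : s ≤ v := by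
            rw [← hveq, ← hcveq]
            exact (hsize_min kv hkv).1
          have h2 : v ≤ s := PySem.List.min?_isMin h s hs_mem
          rw [le_antisymm h2 h1]
      -- A's index() call returns the head's index
      have hidx : PySem.List.index? (cs.map (fun c => ((c : List Int).length : Int))) s = some k := by
        apply pv_index?_first (by simpa using hk)
        · rw [List.getElem_map]; exact hs_eq.symm
        · intro j hj hje
          rw [List.getElem_map] at hje
          have := (hsize_min j (by omega)).2 hje
          omega
      -- hence A's step updates exactly cluster k
      have hA : pvStepA cs b = cs.set k (cs[k] ++ b) := by
        simp only [pvStepA, hmn, hidx]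
        rw [List.getD_eq_getElem cs [] hk]
      -- B's step re-inserts the grown head
      have hB : pvStepB ((s, i, c) :: rest) b = pvInsEntry (s + (b.length : Int), i, c ++ b) rest := by
        show pvInsBack _ rest = _
        exact pvInsBack_eq_pvInsEntry _ (List.pairwise_cons.mp hs).2
      -- the enum of A's new clusters is the enum of cs with entry k replaced by the grown head
      have hEnum : pvEnum 0 (pvStepA cs b) = (pvEnum 0 cs).set k (s + (b.length : Int), i, c ++ b) := by
        rw [hA, pvEnum_set cs 0 k (cs[k] ++ b) hk]
        congr 1
        refine Prod.ext ?_ (Prod.ext ?_ ?_)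
        · simp only [List.length_append]
          rw [hs_eq]; push_cast; ring
        · simp only
          omega
        · simp only
          rw [hc_eq]
      have hk_enum : k < (pvEnum 0 cs).length := by rwa [pvEnum_length]
      have hgetk : (pvEnum 0 cs)[k]'hk_enum = ((s, i, c) : Int × Int × List Int) := by
        rw [pvEnum_getElem cs 0 k hk, hek]
      -- rest is a permutation of the other entries
      have hrest : rest.Perm ((pvEnum 0 cs).eraseIdx k) := by
        have h1 : (pvEnum 0 cs).Perm (((s, i, c) : Int × Int × List Int) :: (pvEnum 0 cs).erase (s, i, c)) :=
          List.perm_cons_erase he_mem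
        have h2 : rest.Perm ((pvEnum 0 cs).erase (s, i, c)) := (hp.trans h1).cons_inv
        rwa [← hgetk, List.Nodup.erase_getElem (pvEnum_nodup 0 cs)] at h2
      -- entries other than the head have a different cluster index
      have hne : ∀ x ∈ rest, x.2.1 ≠ ((s + (b.length : Int), i, c ++ b) : Int × Int × List Int).2.1 := by
        intro x hx hxi
        simp only at hxi
        have hx_er : x ∈ (pvEnum 0 cs).erase (s, i, c) := by
          rw [← hgetk, List.Nodup.erase_getElem (pvEnum_nodup 0 cs)]
          exact hrest.subset hx
        obtain ⟨hxne, hxmem⟩ := (List.Nodup.mem_erase_iff (pvEnum_nodup 0 cs)).mp hx_er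
        obtain ⟨k'', hk'', hx_eq⟩ := pvEnum_mem.mp hxmem
        apply hxne
        have hkk : k'' = k := by
          have h21 := congrArg (fun p => p.2.1) hx_eq
          simp only at h21
          omega
        subst hkk
        exact hx_eq.trans hek.symm
      constructor
      · rw [hB, hEnum]
        refine (pvInsEntry_perm _ rest).trans ?_
        refine (hrest.cons _).trans ?_
        exact (pv_set_perm (pvEnum 0 cs) k _ hk_enum).symm
      · rw [hB]
        exact pvInsEntry_pairwise (List.pairwise_cons.mp hs).2 hne

theorem pv_fold_inv (queue : List (List Int)) :
    ∀ (cs : List (List Int)) (es : List (Int × Int × List Int)),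
      es.Perm (pvEnum 0 cs) → es.Pairwise pvKeyLt →
      (queue.foldl pvStepB es).Perm (pvEnum 0 (queue.foldl pvStepA cs)) ∧
      (queue.foldl pvStepB es).Pairwise pvKeyLt := by
  induction queue with
  | nil => exact fun cs es hp hs => ⟨hp, hs⟩
  | cons b queue ih =>
    intro cs es hp hs
    have h := pv_step_inv cs es b hp hs
    simpa using ih (pvStepA cs b) (pvStepB es b) h.1 h.2

-- ===== VERDICT (by name: the statement is the Claim_ definition above) =====
theorem greedy_merge_small_buckets_spec : Claim_equal_greedy_merge_small_buckets := by
  intro small_buckets m target_size _hdom _hpre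
  unfold Spec_greedy_merge_small_buckets greedy_merge_small_buckets greedy_merge_small_buckets_alt
  simp only
  set queue := PySem.List.sorted small_buckets (fun b => -((b : List Int).length : Int)) with hq
  have hcl : (PySem.List.pyRange 0 m).map (fun _ => ([] : List Int)) = List.replicate (m - 0).toNat [] := by
    rw [PySem.List.pyRange_one, List.map_map]
    simp only [Function.comp_def]
    rw [List.map_const', List.length_range]
  have hen : (PySem.List.pyRange 0 m).map (fun i => ((0 : Int), i, ([] : List Int)))
      = pvEnum 0 (List.replicate (m - 0).toNat []) := by
    rw [PySem.List.pyRange_one, List.map_map, pvEnum_replicate]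
    rfl
  have hpair0 : ((PySem.List.pyRange 0 m).map (fun i => ((0 : Int), i, ([] : List Int)))).Pairwise pvKeyLt := by
    refine List.Pairwise.map _ ?_ (PySem.List.pairwise_lt_pyRange_one 0 m)
    intro a b hab
    exact Or.inr ⟨rfl, hab⟩
  have hinv := pv_fold_inv queue (List.replicate (m - 0).toNat [])
    ((PySem.List.pyRange 0 m).map (fun i => ((0 : Int), i, ([] : List Int))))
    (by rw [hen]) hpair0
  rw [hcl]
  set csF := queue.foldl pvStepA (List.replicate (m - 0).toNat []) with hcsF
  have hlenF : csF.length = (m - 0).toNat := by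
    rw [hcsF, pv_foldA_length, List.length_replicate]
  have hm : m.toNat = (m - 0).toNat := by omega
  rw [hm, ← hlenF]
  exact (pv_scatter csF _ (List.replicate csF.length []) (List.length_replicate)
    (fun e he => by
      obtain ⟨k, hk, hek⟩ := pvEnum_mem.mp (hinv.1.subset he)
      exact ⟨k, hk, by rw [hek]; simp, by rw [hek]⟩)
    (fun k hk habs => by
      exfalso
      apply habs
      have : (((csF[k]).length : Int), (0 : Int) + k, csF[k]) ∈ pvEnum 0 csF :=
        pvEnum_mem.mpr ⟨k, hk, rfl⟩
      have hmem := hinv.1.mem_iff.mpr this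
      have := List.mem_map_of_mem (f := fun e => e.2.1) hmem
      simpa using this)).symm
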